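-- pv_equiv track=rewrite | github.com/MatthijsdeJ/GNN_PN_Operation_MSc_Thesis | training.py | tv_groupby_subst
-- ===== SOURCE A (Python) =====
-- from typing import Sequence, List, Callable, Tuple, Optional
--
-- def tv_groupby_subst(tv: Sequence, sub_info: Sequence[int]) -> \
--         List[Sequence]:
--     '''
--     Group a sequence the shape of the topology vector by the substations.
--
--     Parameters
--     ----------
--     tv : Sequence
--         Sequence the shape of the topology vector.
--     sub_info : Sequence[int]
--         Sequence with elements containing the number of object connected to
--         each substation.
--
--     Returns
--     -------
--     List[Sequence]
--         List, each element corresponding to a Sequence of objects in tv that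
--         belong to a particular substation.
--     '''
--     i = 0
--     gs = []
--     for ss in sub_info:
--         gs.append(tv[i:i+ss])
--         i+=ss
--     return gs
-- ===== SOURCE B (Python) =====
-- def tv_groupby_subst(tv, sub_info):
--     # Phase 1: build a prefix-sum boundary table of slice endpoints.
--     offsets = [0]
--     for ss in sub_info:
--         offsets.append(offsets[-1] + ss)
--     # Phase 2: derive each group from consecutive boundary pairs.
--     return [tv[a:b] for a, b in zip(offsets, offsets[1:])]
-- ===== Notes on version B (the rewrite author's own statement) =====
-- stated objective: alternative
-- what changed: Replaces the mutable running-index loop that appends slices with a two-phase scheme: first build a prefix-sum table of boundary offsets, then produce all groups in one comprehension over zipped consecutive boundary pairs.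
import Mathlib
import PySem

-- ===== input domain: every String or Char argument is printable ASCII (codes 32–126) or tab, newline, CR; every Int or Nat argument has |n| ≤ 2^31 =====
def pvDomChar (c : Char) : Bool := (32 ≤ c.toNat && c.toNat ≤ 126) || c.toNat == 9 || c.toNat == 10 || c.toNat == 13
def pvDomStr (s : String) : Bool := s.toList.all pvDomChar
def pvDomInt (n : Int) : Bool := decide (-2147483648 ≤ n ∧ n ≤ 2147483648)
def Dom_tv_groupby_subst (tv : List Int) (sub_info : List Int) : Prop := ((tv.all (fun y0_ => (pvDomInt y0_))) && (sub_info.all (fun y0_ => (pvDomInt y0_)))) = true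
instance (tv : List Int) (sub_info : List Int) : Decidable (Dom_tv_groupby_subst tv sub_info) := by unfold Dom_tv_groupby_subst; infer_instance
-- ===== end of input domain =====

-- B replaces A's mutable running-index loop by a prefix-sum boundary table zipped with itself (alternative decomposition, same cost).

-- ===== PORT A =====
-- i = 0; gs = []; for ss in sub_info: gs.append(tv[i:i+ss]); i += ss
def tv_groupby_subst (tv : List Int) (sub_info : List Int) : List (List Int) :=
  (sub_info.foldl
    (fun (st : Int × List (List Int)) ss =>
      (st.1 + ss, st.2 ++ [PySem.List.slice tv (some st.1) (some (st.1 + ss))]))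
    (0, [])).2

-- ===== PORT B =====
-- offsets = [0]; for ss in sub_info: offsets.append(offsets[-1] + ss); then zip consecutive boundaries
def tv_groupby_subst_alt (tv : List Int) (sub_info : List Int) : List (List Int) :=
  let offsets : List Int :=
    sub_info.foldl (fun os ss => os ++ [PySem.List.pyGetD os (-1) 0 + ss]) [0]
  (offsets.zip offsets.tail).map (fun ab => PySem.List.slice tv (some ab.1) (some ab.2))

-- ===== PRECONDITION & SPEC =====
def Spec_tv_groupby_subst (tv : List Int) (sub_info : List Int) (out : List (List Int)) : Prop := out = tv_groupby_subst_alt tv sub_info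
instance (tv : List Int) (sub_info : List Int) (out : List (List Int)) : Decidable (Spec_tv_groupby_subst tv sub_info out) := by unfold Spec_tv_groupby_subst; infer_instance

-- ===== CLAIM (what is proved, stated in full; the proofs are below) =====
def Claim_equal_tv_groupby_subst : Prop := ∀ (tv : List Int) (sub_info : List Int), Dom_tv_groupby_subst tv sub_info → Spec_tv_groupby_subst tv sub_info (tv_groupby_subst tv sub_info)

-- ===== LEMMAS AND PROOFS =====

/-- The list of groups, characterised recursively. -/
def pvChunks (tv : List Int) (i : Int) : List Int → List (List Int)
  | [] => []
  | ss :: l => PySem.List.slice tv (some i) (some (i + ss)) :: pvChunks tv (i + ss) l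

/-- The tail of the boundary table after start `i`. -/
def pvOffs (i : Int) : List Int → List Int
  | [] => []
  | ss :: l => (i + ss) :: pvOffs (i + ss) l

theorem foldA_eq (tv : List Int) : ∀ (l : List Int) (i : Int) (gs : List (List Int)),
    (l.foldl (fun (st : Int × List (List Int)) ss =>
        (st.1 + ss, st.2 ++ [PySem.List.slice tv (some st.1) (some (st.1 + ss))])) (i, gs)).2
      = gs ++ pvChunks tv i l := by
  intro l
  induction l with
  | nil => intro i gs; simp [pvChunks]
  | cons ss l ih =>
      intro i gs
      simp only [List.foldl_cons, pvChunks]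
      rw [ih]
      simp

theorem foldB_eq : ∀ (l : List Int) (pre : List Int) (i : Int),
    (l.foldl (fun os ss => os ++ [PySem.List.pyGetD os (-1) 0 + ss]) (pre ++ [i]))
      = pre ++ [i] ++ pvOffs i l := by
  intro l
  induction l with
  | nil => intro pre i; simp [pvOffs]
  | cons ss l ih =>
      intro pre i
      simp only [List.foldl_cons, pvOffs, PySem.List.pyGetD_neg_one_append_singleton]
      have := ih (pre ++ [i]) (i + ss)
      simp only [List.append_assoc] at this ⊢
      simpa using this
  
theorem zip_offs_eq (tv : List Int) : ∀ (l : List Int) (i : Int),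
    (((i :: pvOffs i l).zip (pvOffs i l)).map
        (fun ab => PySem.List.slice tv (some ab.1) (some ab.2)))
      = pvChunks tv i l := by
  intro l
  induction l with
  | nil => intro i; simp [pvOffs, pvChunks]
  | cons ss l ih =>
      intro i
      simp only [pvOffs, pvChunks, List.zip_cons_cons, List.map_cons]
      exact congrArg _ (ih (i + ss))

-- ===== VERDICT (by name: the statement is the Claim_ definition above) =====
theorem tv_groupby_subst_spec : Claim_equal_tv_groupby_subst := by
  intro tv sub_info _
  unfold Spec_tv_groupby_subst tv_groupby_subst tv_groupby_subst_alt
  have hb := foldB_eq sub_info [] 0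
  simp only [List.nil_append] at hb
  rw [foldA_eq tv sub_info 0 [], hb]
  simpa [List.tail] using (zip_offs_eq tv sub_info 0).symm
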